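-- pv_equiv track=rewrite | github.com/bradyz/sandbox | challenges/ut_acm_10_21/theorem.py | dp
-- ===== SOURCE A (Python) =====
-- def dp(i, j, equation, memo):
--     if (i, j) in memo:
--         return memo[(i, j)]
--     elif i == j:
--         return set([equation[i]])
--     result = set()
--     for k in range(i, j):
--         for left in dp(i, k, equation, memo):
--             for right in dp(k+1, j, equation, memo):
--                 result.add(left - right)
--     memo[(i, j)] = result
--     return result
-- ===== SOURCE B (Python) =====
-- def dp(i, j, equation, memo):
--     if (i, j) in memo:
--         return memo[(i, j)]
--     if i > j:
--         return set()
--     table = {}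
--     for d in range(j - i + 1):
--         for a in range(i, j - d + 1):
--             b = a + d
--             if (a, b) in memo:
--                 s = memo[(a, b)]
--             elif d == 0:
--                 s = {equation[a]}
--             else:
--                 s = {l - r
--                      for k in range(a, b)
--                      for l in table[(a, k)]
--                      for r in table[(k + 1, b)]}
--             table[(a, b)] = s
--     return table[(i, j)]
-- ===== Notes on version B (the rewrite author's own statement) =====
-- stated objective: alternative
-- what changed: A's top-down memoized recursion (which threads and mutates the memo dict) is replaced by an iterative bottom-up dynamic program that fills a fresh interval table in order of increasing interval length, consulting the caller's memo read-only.
-- outside the precondition, e.g. on dp(0, 1, [5], {(0, 0): {7}, (1, 1): {9}}): A returns {-2}, B returns {-2}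
import Mathlib
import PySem

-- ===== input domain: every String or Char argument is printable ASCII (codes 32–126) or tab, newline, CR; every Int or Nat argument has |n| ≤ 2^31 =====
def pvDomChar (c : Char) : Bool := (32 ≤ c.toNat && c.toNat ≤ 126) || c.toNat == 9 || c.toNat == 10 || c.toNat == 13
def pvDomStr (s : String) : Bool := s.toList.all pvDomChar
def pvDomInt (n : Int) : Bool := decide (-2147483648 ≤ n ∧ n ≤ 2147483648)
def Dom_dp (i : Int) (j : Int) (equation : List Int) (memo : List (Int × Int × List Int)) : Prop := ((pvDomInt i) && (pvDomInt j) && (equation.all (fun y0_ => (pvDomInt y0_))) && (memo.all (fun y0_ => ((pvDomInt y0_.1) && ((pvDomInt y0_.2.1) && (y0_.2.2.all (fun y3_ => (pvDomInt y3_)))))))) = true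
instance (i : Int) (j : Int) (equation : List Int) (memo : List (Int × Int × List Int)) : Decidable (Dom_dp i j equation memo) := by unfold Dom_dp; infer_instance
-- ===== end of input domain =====

-- B replaces A's memoized top-down recursion by an iterative bottom-up interval table (objective: alternative).
-- In Python, A also mutates `memo` in place; the equivalence proved here is about the RETURN value only.

-- ===== PORT A =====
-- memo is dict[(int,int), set[int]] encoded as List (Int × Int × List Int); 'memo[(i,j)]' = first entry with both key components equal
def lookup2 (i j : Int) : List (Int × Int × List Int) → Option (List Int)
  | [] => none
  | (a, b, v) :: rest => if a = i ∧ b = j then some v else lookup2 i j rest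

-- A's recursion, with the Python dict threaded through as state; the fuel ((j-i).toNat+1 always
-- suffices, every recursive call is on a strictly shorter interval) only makes the recursion
-- structural, it never changes the computed value.
def dpAux (eq : List Int) : Nat → Int → Int → List (Int × Int × List Int) → List Int × List (Int × Int × List Int)
  | 0, _, _, m => ([], m)
  | fuel + 1, i, j, m =>
    match lookup2 i j m with
    | some v => (v, m)
    | none =>
      if i = j then
        ((match PySem.List.pyGet? eq i with
          | some x => [x]
          | none => []),                    -- IndexError in Python; outside Pre_dp
         m)
      else
        let p := (PySem.List.pyRange i j 1).foldl
          (fun (p : List Int × List (Int × Int × List Int)) k =>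
            let l := dpAux eq fuel i k p.2
            l.1.foldl
              (fun (q : List Int × List (Int × Int × List Int)) left =>
                let r := dpAux eq fuel (k + 1) j q.2   -- Python re-evaluates dp(k+1, j, …) for each `left`
                (r.1.foldl (fun acc right => PySem.Set.add acc (left - right)) q.1, r.2))
              (p.1, l.2))
          (([] : List Int), m)
        (p.1, p.2 ++ [(i, j, p.1)])          -- memo[(i,j)] = result

def dp (i : Int) (j : Int) (equation : List Int) (memo : List (Int × Int × List Int)) : List Int :=
  (dpAux equation ((j - i).toNat + 1) i j memo).1

-- ===== PORT B =====
-- the set comprehension {l - r for k in range(a,b) for l in table[(a,k)] for r in table[(k+1,b)]}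
-- (those table entries are always present when it runs, so the .getD [] default is never taken)
def combInterval (a b : Int) (tbl : List (Int × Int × List Int)) : List Int :=
  (PySem.List.pyRange a b 1).foldl
    (fun res k =>
      ((lookup2 a k tbl).getD []).foldl
        (fun res2 l =>
          ((lookup2 (k + 1) b tbl).getD []).foldl
            (fun res3 r => PySem.Set.add res3 (l - r)) res2)
        res)
    []

def dp_alt (i : Int) (j : Int) (equation : List Int) (memo : List (Int × Int × List Int)) : List Int :=
  match lookup2 i j memo with
  | some v => v
  | none =>
    if i > j then []
    else
      (lookup2 i j                        -- table[(i,j)]: always present at this point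
        ((PySem.List.pyRange 0 (j - i + 1) 1).foldl
        (fun tbl d =>
          (PySem.List.pyRange i (j - d + 1) 1).foldl
            (fun tbl2 a =>
              tbl2 ++ [(a, a + d,       -- s = the cell value, appended to the table
                match lookup2 a (a + d) memo with
                | some v => v
                | none =>
                  if d = 0 then
                    match PySem.List.pyGet? equation a with
                    | some x => [x]
                    | none => []          -- IndexError in Python; outside Pre_dp
                  else combInterval a (a + d) tbl2)])
            tbl)
        ([] : List (Int × Int × List Int)))).getD []

-- ===== PRECONDITION & SPEC =====
-- Pre_dp excludes the inputs on which the base case equation[a] can raise IndexError: it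
-- conservatively requires the whole span [i,j] to be in range (or i > j, or a direct memo hit
-- for (i,j)); interior memo entries can mask an out-of-range leaf, in which case A still
-- returns — and B agrees there (see the cited excluded example).
def Pre_dp (i : Int) (j : Int) (equation : List Int) (memo : List (Int × Int × List Int)) : Prop :=
  i > j ∨ (memo.any (fun e => e.1 == i && e.2.1 == j)) = true ∨
    (-(equation.length : Int) ≤ i ∧ j < (equation.length : Int))
instance (i : Int) (j : Int) (equation : List Int) (memo : List (Int × Int × List Int)) : Decidable (Pre_dp i j equation memo) := by unfold Pre_dp; infer_instance
def pvWitness_dp : Int × Int × List Int × (List (Int × Int × List Int)) := (0, 2, [3, 5, -2], [(1, 1, [4])])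

def Spec_dp (i : Int) (j : Int) (equation : List Int) (memo : List (Int × Int × List Int)) (out : List Int) : Prop := out = dp_alt i j equation memo
instance (i : Int) (j : Int) (equation : List Int) (memo : List (Int × Int × List Int)) (out : List Int) : Decidable (Spec_dp i j equation memo out) := by unfold Spec_dp; infer_instance

-- ===== CLAIM (what is proved, stated in full; the proofs are below) =====
def Claim_equal_dp : Prop := ∀ (i : Int) (j : Int) (equation : List Int) (memo : List (Int × Int × List Int)), Dom_dp i j equation memo → Pre_dp i j equation memo → Spec_dp i j equation memo (dp i j equation memo)

-- ===== LEMMAS AND PROOFS =====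

-- The common denotation of both programs: gsp fuel i j is the value of the interval (i,j)
-- determined by the INITIAL memo m0 (any fuel > (j-i).toNat computes it).
def gsp (eq : List Int) (m0 : List (Int × Int × List Int)) : Nat → Int → Int → List Int
  | 0, _, _ => []
  | fuel + 1, i, j =>
    match lookup2 i j m0 with
    | some v => v
    | none =>
      if i = j then
        match PySem.List.pyGet? eq i with
        | some x => [x]
        | none => []
      else
        (PySem.List.pyRange i j 1).foldl
          (fun res k =>
            (gsp eq m0 fuel i k).foldl
              (fun res2 l =>
                (gsp eq m0 fuel (k + 1) j).foldl
                  (fun res3 r => PySem.Set.add res3 (l - r)) res2)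
              res)
          []

def Gv (eq : List Int) (m0 : List (Int × Int × List Int)) (i j : Int) : List Int :=
  gsp eq m0 ((j - i).toNat + 1) i j

theorem gsp_fuel {eq : List Int} {m0 : List (Int × Int × List Int)} :
    ∀ (f1 f2 : Nat) (i j : Int), (j - i).toNat < f1 → (j - i).toNat < f2 →
      gsp eq m0 f1 i j = gsp eq m0 f2 i j := by
  intro f1
  induction f1 with
  | zero => intro f2 i j h1 _; exact absurd h1 (by omega)
  | succ s ih =>
    intro f2 i j h1 h2
    cases f2 with
    | zero => exact absurd h2 (by omega)
    | succ s2 =>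
      simp only [gsp]
      cases hl : lookup2 i j m0 with
      | some v => rfl
      | none =>
        by_cases hij : i = j
        · simp [hij]
        · simp only [hij, if_false]
          apply List.foldl_ext
          intro acc k hk
          rw [PySem.List.mem_pyRange_one] at hk
          rw [ih s2 i k (by omega) (by omega), ih s2 (k + 1) j (by omega) (by omega)]

theorem lookup2_append (i j : Int) (m1 m2 : List (Int × Int × List Int)) :
    lookup2 i j (m1 ++ m2) = if (lookup2 i j m1).isSome then lookup2 i j m1 else lookup2 i j m2 := by
  induction m1 with
  | nil => simp [lookup2]
  | cons e t ih =>
    obtain ⟨a, b, v⟩ := e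
    by_cases h : a = i ∧ b = j
    · simp [lookup2, h]
    · simpa [lookup2, h] using ih

def MInv (eq : List Int) (m0 m : List (Int × Int × List Int)) : Prop :=
  (∀ a b v, lookup2 a b m = some v → v = Gv eq m0 a b) ∧
  (∀ a b, lookup2 a b m = none → lookup2 a b m0 = none)

def stepA (eq : List Int) (f : Nat) (i j : Int)
    (p : List Int × List (Int × Int × List Int)) (k : Int) : List Int × List (Int × Int × List Int) :=
  let l := dpAux eq f i k p.2
  l.1.foldl
    (fun (q : List Int × List (Int × Int × List Int)) left =>
      let r := dpAux eq f (k + 1) j q.2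
      (r.1.foldl (fun acc right => PySem.Set.add acc (left - right)) q.1, r.2))
    (p.1, l.2)

theorem lookup2_singleton (x y a b : Int) (v : List Int) :
    lookup2 x y [(a, b, v)] = if a = x ∧ b = y then some v else none := rfl

theorem dpAux_spec (eq : List Int) (m0 : List (Int × Int × List Int)) :
    ∀ (fuel : Nat) (i j : Int) (m : List (Int × Int × List Int)), (j - i).toNat < fuel → MInv eq m0 m →
      (dpAux eq fuel i j m).1 = Gv eq m0 i j ∧ MInv eq m0 (dpAux eq fuel i j m).2 ∧
        (∀ a b, lookup2 a b (dpAux eq fuel i j m).2 = none → lookup2 a b m = none) := by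
  intro fuel
  induction fuel with
  | zero => intro i j m h _; exact absurd h (by omega)
  | succ f ih =>
    intro i j m h hm
    simp only [dpAux]
    cases hl : lookup2 i j m with
    | some v => exact ⟨hm.1 i j v hl, hm, fun a b hn => hn⟩
    | none =>
      have hl0 : lookup2 i j m0 = none := hm.2 i j hl
      by_cases hij : i = j
      · subst hij
        rw [if_pos rfl]
        refine ⟨?_, hm, fun a b hn => hn⟩
        have h0 : (i - i).toNat + 1 = 1 := by omega
        unfold Gv
        rw [h0]
        rw [gsp, hl0, if_pos rfl]
      · simp only [if_neg hij]
        -- inner loop over one left-operand set, for a fixed split point k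
        have hinner : ∀ (k : Int), i ≤ k → k < j →
            ∀ (L acc : List Int) (m2 : List (Int × Int × List Int)), MInv eq m0 m2 →
            (L.foldl
              (fun (q : List Int × List (Int × Int × List Int)) left =>
                let r := dpAux eq f (k + 1) j q.2
                (r.1.foldl (fun acc right => PySem.Set.add acc (left - right)) q.1, r.2))
              (acc, m2)).1
              = L.foldl (fun a2 left => (Gv eq m0 (k + 1) j).foldl
                  (fun a3 right => PySem.Set.add a3 (left - right)) a2) acc ∧
            MInv eq m0 (L.foldl
              (fun (q : List Int × List (Int × Int × List Int)) left =>
                let r := dpAux eq f (k + 1) j q.2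
                (r.1.foldl (fun acc right => PySem.Set.add acc (left - right)) q.1, r.2))
              (acc, m2)).2 ∧
            (∀ a b, lookup2 a b (L.foldl
              (fun (q : List Int × List (Int × Int × List Int)) left =>
                let r := dpAux eq f (k + 1) j q.2
                (r.1.foldl (fun acc right => PySem.Set.add acc (left - right)) q.1, r.2))
              (acc, m2)).2 = none → lookup2 a b m2 = none) := by
          intro k hik hkj L
          induction L with
          | nil => intro acc m2 hm2; exact ⟨rfl, hm2, fun _ _ hn => hn⟩
          | cons left L ihL =>
            intro acc m2 hm2
            have hr := ih (k + 1) j m2 (by omega) hm2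
            simp only [List.foldl_cons]
            obtain ⟨ha, hb, hc⟩ := ihL
              ((dpAux eq f (k + 1) j m2).1.foldl (fun acc right => PySem.Set.add acc (left - right)) acc)
              (dpAux eq f (k + 1) j m2).2 hr.2.1
            refine ⟨?_, hb, fun a b hn => hr.2.2 a b (hc a b hn)⟩
            rw [ha, hr.1]
        -- outer loop over the split points
        have hloop : ∀ (ks : List Int), (∀ k ∈ ks, i ≤ k ∧ k < j) →
            ∀ (res : List Int) (m1 : List (Int × Int × List Int)), MInv eq m0 m1 →
            (ks.foldl (stepA eq f i j) (res, m1)).1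
              = ks.foldl (fun r k => (Gv eq m0 i k).foldl (fun a2 left => (Gv eq m0 (k + 1) j).foldl
                  (fun a3 right => PySem.Set.add a3 (left - right)) a2) r) res ∧
            MInv eq m0 (ks.foldl (stepA eq f i j) (res, m1)).2 ∧
            (∀ a b, lookup2 a b (ks.foldl (stepA eq f i j) (res, m1)).2 = none → lookup2 a b m1 = none) := by
          intro ks
          induction ks with
          | nil => intro _ res m1 hm1; exact ⟨rfl, hm1, fun _ _ hn => hn⟩
          | cons k ks ihk =>
            intro hb res m1 hm1
            obtain ⟨hik, hkj⟩ := hb k (List.mem_cons_self ..)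
            have hlft := ih i k m1 (by omega) hm1
            simp only [List.foldl_cons]
            have hstep : stepA eq f i j (res, m1) k
                = ((dpAux eq f i k m1).1.foldl
                    (fun (q : List Int × List (Int × Int × List Int)) left =>
                      let r := dpAux eq f (k + 1) j q.2
                      (r.1.foldl (fun acc right => PySem.Set.add acc (left - right)) q.1, r.2))
                    (res, (dpAux eq f i k m1).2)) := rfl
            obtain ⟨ha, hb2, hc⟩ := hinner k hik hkj (dpAux eq f i k m1).1 res (dpAux eq f i k m1).2 hlft.2.1
            have hsv : (stepA eq f i j (res, m1) k).1
                = (Gv eq m0 i k).foldl (fun a2 left => (Gv eq m0 (k + 1) j).foldl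
                    (fun a3 right => PySem.Set.add a3 (left - right)) a2) res := by
              rw [hstep, ha, hlft.1]
            obtain ⟨ka, kb, kc⟩ := ihk (fun x hx => hb x (List.mem_cons_of_mem _ hx))
              (stepA eq f i j (res, m1) k).1 (stepA eq f i j (res, m1) k).2 (by rw [hstep]; exact hb2)
            refine ⟨?_, kb, ?_⟩
            · rw [ka, hsv]
            · intro a b hn
              have h1 : lookup2 a b (stepA eq f i j (res, m1) k).2 = none := kc a b hn
              rw [hstep] at h1
              exact hlft.2.2 a b (hc a b h1)
        -- assemble
        have hks : ∀ k ∈ PySem.List.pyRange i j 1, i ≤ k ∧ k < j := by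
          intro k hk; rw [PySem.List.mem_pyRange_one] at hk; exact hk
        obtain ⟨hv, hInv2, hmono⟩ := hloop (PySem.List.pyRange i j 1) hks [] m hm
        have hGvij : Gv eq m0 i j
            = (PySem.List.pyRange i j 1).foldl
                (fun r k => (Gv eq m0 i k).foldl (fun a2 left => (Gv eq m0 (k + 1) j).foldl
                  (fun a3 right => PySem.Set.add a3 (left - right)) a2) r) [] := by
          unfold Gv
          conv_lhs => rw [gsp]
          rw [hl0]
          simp only [if_neg hij]
          apply List.foldl_ext
          intro acc k hk
          rw [PySem.List.mem_pyRange_one] at hk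
          rw [gsp_fuel ((j - i).toNat) ((k - i).toNat + 1) i k (by omega) (by omega),
            gsp_fuel ((j - i).toNat) ((j - (k + 1)).toNat + 1) (k + 1) j (by omega) (by omega)]
        have hlam : (fun (p : List Int × List (Int × Int × List Int)) k =>
              let l := dpAux eq f i k p.2
              l.1.foldl
                (fun (q : List Int × List (Int × Int × List Int)) left =>
                  let r := dpAux eq f (k + 1) j q.2
                  (r.1.foldl (fun acc right => PySem.Set.add acc (left - right)) q.1, r.2))
                (p.1, l.2))
            = stepA eq f i j := rfl
        rw [hlam]
        set P := (PySem.List.pyRange i j 1).foldl (stepA eq f i j) ([], m) with hP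
        refine ⟨by simpa using hv.trans hGvij.symm, ⟨?_, ?_⟩, ?_⟩
        · intro a b v hv2
          simp only [lookup2_append] at hv2
          by_cases hs : (lookup2 a b P.2).isSome
          · rw [if_pos hs] at hv2
            exact hInv2.1 a b v hv2
          · rw [if_neg hs, lookup2_singleton] at hv2
            by_cases hab : i = a ∧ j = b
            · rw [if_pos hab] at hv2
              obtain ⟨rfl, rfl⟩ := hab
              have := hv.trans hGvij.symm
              simp only [Option.some.injEq] at hv2
              rw [← hv2]
              exact this
            · rw [if_neg hab] at hv2; exact absurd hv2 (by simp)
        · intro a b hn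
          simp only [lookup2_append] at hn
          by_cases hs : (lookup2 a b P.2).isSome
          · rw [if_pos hs] at hn
            rw [hn] at hs; exact absurd hs (by simp)
          · have h2 : lookup2 a b P.2 = none := Option.not_isSome_iff_eq_none.mp hs
            exact (hInv2.2) a b h2
        · intro a b hn
          simp only [lookup2_append] at hn
          by_cases hs : (lookup2 a b P.2).isSome
          · rw [if_pos hs] at hn
            rw [hn] at hs; exact absurd hs (by simp)
          · have h2 : lookup2 a b P.2 = none := Option.not_isSome_iff_eq_none.mp hs
            exact hmono a b h2

theorem MInv_init (eq : List Int) (m0 : List (Int × Int × List Int)) : MInv eq m0 m0 := by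
  constructor
  · intro a b v hv
    unfold Gv gsp
    rw [hv]
  · intro a b h; exact h

theorem dp_eq_Gv (i j : Int) (eq : List Int) (m0 : List (Int × Int × List Int)) :
    dp i j eq m0 = Gv eq m0 i j := by
  unfold dp
  exact (dpAux_spec eq m0 ((j - i).toNat + 1) i j m0 (by omega) (MInv_init eq m0)).1

def doneP (i j d a x y : Int) : Prop :=
  i ≤ x ∧ x ≤ y ∧ y ≤ j ∧ (y - x < d ∨ (y - x = d ∧ x < a))

def TblInv (eq : List Int) (m0 : List (Int × Int × List Int)) (i j d a : Int)
    (tbl : List (Int × Int × List Int)) : Prop :=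
  ∀ x y : Int, (doneP i j d a x y → lookup2 x y tbl = some (Gv eq m0 x y)) ∧
    (¬ doneP i j d a x y → lookup2 x y tbl = none)

theorem TblInv_of_iff (eq : List Int) (m0 : List (Int × Int × List Int)) {i j d a d' a' : Int}
    {tbl : List (Int × Int × List Int)}
    (h : ∀ x y, doneP i j d a x y ↔ doneP i j d' a' x y)
    (ht : TblInv eq m0 i j d a tbl) : TblInv eq m0 i j d' a' tbl := by
  intro x y
  exact ⟨fun hd => (ht x y).1 ((h x y).mpr hd), fun hd => (ht x y).2 (fun hc => hd ((h x y).mp hc))⟩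

theorem cell_eq_Gv (eq : List Int) (m0 : List (Int × Int × List Int)) (i j d a : Int)
    (tbl : List (Int × Int × List Int))
    (hia : i ≤ a) (haj : a + d ≤ j) (hd : 1 ≤ d)
    (hm : lookup2 a (a + d) m0 = none)
    (ht : TblInv eq m0 i j d a tbl) :
    combInterval a (a + d) tbl = Gv eq m0 a (a + d) := by
  have hb : (a + d - a).toNat + 1 = d.toNat + 1 := by omega
  unfold Gv
  rw [hb]
  rw [gsp, hm, if_neg (by omega : ¬ a = a + d)]
  unfold combInterval
  apply List.foldl_ext
  intro acc k hk
  rw [PySem.List.mem_pyRange_one] at hk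
  have h1 : lookup2 a k tbl = some (Gv eq m0 a k) :=
    (ht a k).1 ⟨hia, by omega, by omega, Or.inl (by omega)⟩
  have h2 : lookup2 (k + 1) (a + d) tbl = some (Gv eq m0 (k + 1) (a + d)) :=
    (ht (k + 1) (a + d)).1 ⟨by omega, by omega, haj, Or.inl (by omega)⟩
  rw [h1, h2]
  simp only [Option.getD_some]
  rw [gsp_fuel d.toNat ((k - a).toNat + 1) a k (by omega) (by omega),
    gsp_fuel d.toNat ((a + d - (k + 1)).toNat + 1) (k + 1) (a + d) (by omega) (by omega)]
  rfl

theorem rowStep (eq : List Int) (m0 : List (Int × Int × List Int)) (i j d a : Int)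
    (tbl : List (Int × Int × List Int))
    (hia : i ≤ a) (haj : a ≤ j - d) (hd : 0 ≤ d)
    (ht : TblInv eq m0 i j d a tbl) (s : List Int) (hs : s = Gv eq m0 a (a + d)) :
    TblInv eq m0 i j d (a + 1) (tbl ++ [(a, a + d, s)]) := by
  intro x y
  constructor
  · intro hdone
    by_cases hxy : x = a ∧ y = a + d
    · obtain ⟨rfl, rfl⟩ := hxy
      have hold : lookup2 x (x + d) tbl = none := by
        refine (ht x (x + d)).2 ?_
        unfold doneP
        omega
      rw [lookup2_append, hold]
      simp only [Option.isSome_none, Bool.false_eq_true, if_false, lookup2_singleton]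
      rw [if_pos ⟨trivial, trivial⟩, hs]
    · have hdold : doneP i j d a x y := by
        unfold doneP at hdone ⊢
        omega
      have hold := (ht x y).1 hdold
      rw [lookup2_append, hold]
      simp
  · intro hnd
    have h1 : lookup2 x y tbl = none := by
      refine (ht x y).2 ?_
      intro hc
      exact hnd (by unfold doneP at hc ⊢; omega)
    have h2 : ¬ (x = a ∧ y = a + d) := by
      intro hc
      exact hnd (by unfold doneP; omega)
    rw [lookup2_append, h1]
    simp only [Option.isSome_none, Bool.false_eq_true, if_false, lookup2_singleton]
    rw [if_neg (by tauto)]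

theorem rowLoop (eq : List Int) (m0 : List (Int × Int × List Int)) (i j d : Int) (hd : 0 ≤ d) :
    ∀ (n : Nat) (a : Int) (tbl : List (Int × Int × List Int)), i ≤ a → a + n = j - d + 1 →
      TblInv eq m0 i j d a tbl →
      TblInv eq m0 i j d (j - d + 1)
        ((PySem.List.pyRange a (j - d + 1) 1).foldl
          (fun tbl2 a =>
            tbl2 ++ [(a, a + d,
              match lookup2 a (a + d) m0 with
              | some v => v
              | none =>
                if d = 0 then
                  match PySem.List.pyGet? eq a with
                  | some x => [x]
                  | none => []
                else combInterval a (a + d) tbl2)])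
          tbl) := by
  intro n
  induction n with
  | zero =>
    intro a tbl hia hn ht
    rw [PySem.List.pyRange_one_eq_nil (by omega)]
    have : a = j - d + 1 := by omega
    subst this
    exact ht
  | succ n ihn =>
    intro a tbl hia hn ht
    rw [PySem.List.pyRange_one_cons (by omega)]
    rw [List.foldl_cons]
    have hs : (match lookup2 a (a + d) m0 with
        | some v => v
        | none =>
          if d = 0 then
            match PySem.List.pyGet? eq a with
            | some x => [x]
            | none => []
          else combInterval a (a + d) tbl) = Gv eq m0 a (a + d) := by
      cases hm : lookup2 a (a + d) m0 with
      | some v =>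
        unfold Gv
        rw [gsp, hm]
      | none =>
        by_cases h0 : d = 0
        · rw [if_pos h0]
          unfold Gv
          rw [show (a + d - a).toNat + 1 = 1 from by omega]
          rw [gsp, hm, if_pos (by omega : a = a + d)]
        · rw [if_neg h0]
          exact cell_eq_Gv eq m0 i j d a tbl hia (by omega) (by omega) hm ht
    apply ihn (a + 1) _ (by omega) (by omega)
    exact rowStep eq m0 i j d a tbl hia (by omega) hd ht _ hs

theorem dLoop (eq : List Int) (m0 : List (Int × Int × List Int)) (i j : Int) :
    ∀ (n : Nat) (d0 : Int) (tbl : List (Int × Int × List Int)), 0 ≤ d0 → d0 + n = j - i + 1 →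
      TblInv eq m0 i j d0 i tbl →
      TblInv eq m0 i j (j - i + 1) i
        ((PySem.List.pyRange d0 (j - i + 1) 1).foldl
          (fun tbl d =>
            (PySem.List.pyRange i (j - d + 1) 1).foldl
              (fun tbl2 a =>
                tbl2 ++ [(a, a + d,
                  match lookup2 a (a + d) m0 with
                  | some v => v
                  | none =>
                    if d = 0 then
                      match PySem.List.pyGet? eq a with
                      | some x => [x]
                      | none => []
                    else combInterval a (a + d) tbl2)])
              tbl)
          tbl) := by
  intro n
  induction n with
  | zero =>
    intro d0 tbl hd0 hn ht
    rw [PySem.List.pyRange_one_eq_nil (by omega)]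
    have : d0 = j - i + 1 := by omega
    subst this
    exact ht
  | succ n ihn =>
    intro d0 tbl hd0 hn ht
    rw [PySem.List.pyRange_one_cons (by omega)]
    rw [List.foldl_cons]
    have hrow := rowLoop eq m0 i j d0 hd0 (j - d0 + 1 - i).toNat i tbl (by omega)
      (by omega) ht
    apply ihn (d0 + 1) _ (by omega) (by omega)
    refine TblInv_of_iff eq m0 ?_ hrow
    intro x y
    unfold doneP
    omega

theorem dp_alt_eq_Gv (i j : Int) (eq : List Int) (m0 : List (Int × Int × List Int)) :
    dp_alt i j eq m0 = Gv eq m0 i j := by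
  unfold dp_alt
  split
  · next v hl =>
    unfold Gv
    rw [gsp, hl]
  · next hl =>
    by_cases hij : i > j
    · rw [if_pos hij]
      unfold Gv
      rw [gsp, hl, if_neg (by omega : ¬ i = j), PySem.List.pyRange_one_eq_nil (by omega)]
      rfl
    · rw [if_neg hij]
      have h0 : TblInv eq m0 i j 0 i [] := by
        intro x y
        constructor
        · intro hd; exact absurd hd (by unfold doneP; omega)
        · intro _; rfl
      have ht := dLoop eq m0 i j (j - i + 1).toNat 0 [] (by omega) (by omega) h0
      have hfin := (ht i j).1 ⟨le_refl i, by omega, le_refl j, Or.inl (by omega)⟩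
      rw [hfin]
      rfl

-- ===== VERDICT (by name: the statement is the Claim_ definition above) =====
theorem dp_spec : Claim_equal_dp := by
  intro i j equation memo _ _
  unfold Spec_dp
  rw [dp_eq_Gv, dp_alt_eq_Gv]
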